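-- pv_equiv track=rewrite | github.com/YonatanBest/A2SV-LeetCode-Problems | 2076-sum-of-digits-of-string-after-convert/2076-sum-of-digits-of-string-after-convert.py | getLucky
-- ===== SOURCE A (Python) =====
-- def getLucky(s: str, k: int) -> int:
--     arr = []
--     for i in s:
--         arr.append(str(ord(i) - 96))
--     total = "".join(arr)
--     for i in range(k):
--         temp = 0
--         for j in total:
--             temp += int(j)
--         total = str(temp)
--     return int(total)
-- ===== SOURCE B (Python) =====
-- def getLucky(s: str, k: int) -> int:
--     if k <= 0:
--         return int("".join(str(ord(c) - 96) for c in s))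
--     n = 0
--     for c in s:
--         v = ord(c) - 96
--         n += v // 10 + v % 10
--     for _ in range(k - 1):
--         if n < 10:
--             break
--         t = 0
--         while n:
--             t += n % 10
--             n //= 10
--         n = t
--     return n
-- ===== Notes on version B (the rewrite author's own statement) =====
-- stated objective: faster
-- what changed: The k digit-sum rounds over strings (str()/int() per character) are replaced by integer arithmetic: a closed-form v//10+v%10 per character for the first round, %10-//10 extraction for later rounds, and an early exit once the value drops below 10 (a fixed point of digit-summing), so at most ~2 arithmetic rounds run regardless of k.
import Mathlib
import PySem

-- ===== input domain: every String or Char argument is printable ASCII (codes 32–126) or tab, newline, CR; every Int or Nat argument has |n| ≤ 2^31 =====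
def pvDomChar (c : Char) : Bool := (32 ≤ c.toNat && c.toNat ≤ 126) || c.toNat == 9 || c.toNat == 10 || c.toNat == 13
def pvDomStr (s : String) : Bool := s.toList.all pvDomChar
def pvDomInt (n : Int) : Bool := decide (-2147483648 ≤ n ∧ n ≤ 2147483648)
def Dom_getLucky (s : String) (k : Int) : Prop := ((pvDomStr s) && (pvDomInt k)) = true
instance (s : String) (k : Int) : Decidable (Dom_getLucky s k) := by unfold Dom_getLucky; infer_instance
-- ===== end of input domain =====

-- B replaces the per-character string/int digit rounds by integer arithmetic with an early exit at the <10 fixed point (measured faster in a timing run).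

-- ===== PORT A =====
-- `ord i` is ported exactly as `i.toNat` (the code point); `int(j)` is PySem.Int.ofStr? with
-- `.getD 0` for the ValueError case, which Pre_getLucky excludes.
def getLucky (s : String) (k : Int) : Int :=
  let arr : List String := s.toList.foldl (fun arr i => arr ++ [PySem.Int.toStr ((i.toNat : Int) - 96)]) []
  let total : String := PySem.Str.join "" arr
  let total2 : String := (PySem.List.pyRange 0 k 1).foldl
    (fun total _i =>
      PySem.Int.toStr (total.toList.foldl (fun temp j => temp + (PySem.Int.ofStr? (String.ofList [j])).getD 0) 0))
    total
  (PySem.Int.ofStr? total2).getD 0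

-- ===== PORT B =====
-- Source B's `t = 0; while n: t += n % 10; n //= 10` digit-extraction loop; Python's `while n`
-- tests n ≠ 0, but the loop is only ever entered with n ≥ 10 (guarded by the `n < 10` break),
-- and for n > 0 the two conditions agree, so `0 < n` is exact there and gives termination.
def pvDigits (n t : Int) : Int :=
  if 0 < n then pvDigits (PySem.Int.floordiv n 10) (t + PySem.Int.mod n 10) else t
termination_by n.toNat
decreasing_by
  rw [PySem.Int.floordiv_eq_ediv_of_pos (by norm_num)]
  omega

-- the `break` on n < 10 is ported as an early-exit guard: once n < 10 the state is returned
-- unchanged, so guarding every remaining iteration is exact.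
def getLucky_alt (s : String) (k : Int) : Int :=
  if k ≤ 0 then
    (PySem.Int.ofStr? (PySem.Str.join "" (s.toList.map (fun c => PySem.Int.toStr ((c.toNat : Int) - 96))))).getD 0
  else
    let n0 : Int := s.toList.foldl
      (fun n c => n + (PySem.Int.floordiv ((c.toNat : Int) - 96) 10 + PySem.Int.mod ((c.toNat : Int) - 96) 10)) 0
    (PySem.List.pyRange 0 (k - 1) 1).foldl (fun n _i => if n < 10 then n else pvDigits n 0) n0

-- ===== PRECONDITION & SPEC =====
-- Pre_ excludes exactly the inputs on which the Python A raises ValueError: with k ≥ 1 a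
-- character below '`' (code 96) makes some per-character value negative, so int() hits a '-';
-- with k ≤ 0 int() is applied to the whole joined string, which fails for empty s and for a
-- '-' after the first position (a character below code 96 anywhere past the first character).
def Pre_getLucky (s : String) (k : Int) : Prop :=
  if 1 ≤ k then s.toList.all (fun c => 96 ≤ c.toNat) = true
  else s.toList ≠ [] ∧ (s.toList.drop 1).all (fun c => 96 ≤ c.toNat) = true
instance (s : String) (k : Int) : Decidable (Pre_getLucky s k) := by unfold Pre_getLucky; infer_instance

def pvWitness_getLucky : String × Int := ("z", 1)

def Spec_getLucky (s : String) (k : Int) (out : Int) : Prop := out = getLucky_alt s k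
instance (s : String) (k : Int) (out : Int) : Decidable (Spec_getLucky s k out) := by unfold Spec_getLucky; infer_instance

-- ===== CLAIM (what is proved, stated in full; the proofs are below) =====
def Claim_equal_getLucky : Prop := ∀ (s : String) (k : Int), Dom_getLucky s k → Pre_getLucky s k → Spec_getLucky s k (getLucky s k)

-- ===== LEMMAS AND PROOFS =====

-- ---- the per-character value function of A's inner loop ----
def pvVal (j : Char) : Int := (PySem.Int.ofStr? (String.ofList [j])).getD 0

-- ---- parsing a nonempty all-digit character list (Python int on such strings) ----
theorem pv_dropWhile_self {l : List Char} (h : ∀ c ∈ l, PySem.Int.isIntSpace c = false) :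
    l.dropWhile PySem.Int.isIntSpace = l := by
  cases l with
  | nil => rfl
  | cons a t => rw [List.dropWhile_cons_of_neg]; simp [h a List.mem_cons_self]

theorem pv_digit_not_space {c : Char} (h : c.isDigit = true) : PySem.Int.isIntSpace c = false := by
  simp only [Char.isDigit] at h
  simp only [PySem.Int.isIntSpace]
  simp only [Bool.or_eq_false_iff, decide_eq_false_iff_not]
  refine ⟨⟨⟨⟨⟨?_,?_⟩,?_⟩,?_⟩,?_⟩,?_⟩ <;> (intro hc; subst hc; simp_all)

theorem pv_parse_digits (d : Char) (tl : List Char) (h : ∀ c ∈ d :: tl, c.isDigit = true) :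
    PySem.Int.ofChars? (d :: tl) = some ((((d :: tl).foldl (fun a c => a * 10 + (c.toNat - '0'.toNat)) 0) : Nat) : Int) := by
  conv_lhs => whnf
  rw [pv_dropWhile_self (l := d :: tl) (by intro c hc; exact pv_digit_not_space (h c hc))]
  rw [pv_dropWhile_self (by intro c hc; rw [List.mem_reverse] at hc; exact pv_digit_not_space (h c hc)),
      List.reverse_reverse]
  split
  · rename_i ds heq
    have := h d List.mem_cons_self
    rw [List.cons_eq_cons] at heq; obtain ⟨h1, -⟩ := heq; subst h1; simp [Char.isDigit] at this
  · rename_i ds heq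
    have := h d List.mem_cons_self
    rw [List.cons_eq_cons] at heq; obtain ⟨h1, -⟩ := heq; subst h1; simp [Char.isDigit] at this
  · rename_i cs0 hm hp
    simp only [Option.bind_eq_bind, Option.map_id', Option.pure_def]
    have step : ∀ (o : Option Nat) (v : Nat), o = some v → (o.bind fun a => some ((a : Nat) : Int)) = some ((v : Nat) : Int) := by
      rintro o v rfl; rfl
    apply step
    have hd : d.isDigit = true := h d List.mem_cons_self
    conv_lhs => whnf
    rw [hd]
    conv_lhs => whnf
    simp only [List.foldl_cons]
    have htl : ∀ c ∈ tl, c.isDigit = true := fun c hc => h c (List.mem_cons_of_mem _ hc)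
    clear hm hp h cs0
    generalize 0 * 10 + (d.toNat - '0'.toNat) = acc
    induction tl generalizing acc with
    | nil =>
      conv_lhs => whnf
      rfl
    | cons c tl' ih =>
      have hc : c.isDigit = true := htl c List.mem_cons_self
      conv_lhs => whnf
      rw [hc]
      conv_lhs => whnf
      simp only [List.foldl_cons]
      apply ih
      intro x hx
      exact htl x (List.mem_cons_of_mem _ hx)

-- ---- structure of Nat.toDigits 10 ----
theorem pv_tdc_append : ∀ (f n : Nat) (ds : List Char),
    Nat.toDigitsCore 10 f n ds = Nat.toDigitsCore 10 f n [] ++ ds := by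
  intro f
  induction f with
  | zero => intro n ds; rfl
  | succ f ih =>
    intro n ds
    simp only [Nat.toDigitsCore]
    by_cases h : n / 10 = 0
    · simp [h]
    · simp only [h, if_false]
      rw [ih (n / 10) ((n % 10).digitChar :: ds), ih (n / 10) [(n % 10).digitChar]]
      simp

theorem pv_tdc_fuel : ∀ (n f g : Nat) (ds : List Char), n < f → n < g →
    Nat.toDigitsCore 10 f n ds = Nat.toDigitsCore 10 g n ds := by
  intro n
  induction n using Nat.strong_induction_on with
  | _ n ih =>
    intro f g ds hf hg
    match f, g with
    | f + 1, g + 1 =>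
      simp only [Nat.toDigitsCore]
      by_cases h : n / 10 = 0
      · simp [h]
      · simp only [h, if_false]
        exact ih (n / 10) (Nat.div_lt_self (by omega) (by omega)) f g _ (by omega) (by omega)

theorem pv_toDigits_base {n : Nat} (h : n < 10) : Nat.toDigits 10 n = [n.digitChar] := by
  simp only [Nat.toDigits, Nat.toDigitsCore]
  rw [if_pos (by omega)]
  rw [Nat.mod_eq_of_lt h]

theorem pv_toDigits_step {n : Nat} (h : 10 ≤ n) :
    Nat.toDigits 10 n = Nat.toDigits 10 (n / 10) ++ [(n % 10).digitChar] := by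
  simp only [Nat.toDigits]
  rw [show n + 1 = (n : Nat) + 1 from rfl]
  simp only [Nat.toDigitsCore]
  rw [if_neg (by omega)]
  rw [pv_tdc_append]
  congr 1
  exact pv_tdc_fuel (n / 10) n (n / 10 + 1) [] (by omega) (by omega)

theorem pv_digitChar_isDigit {d : Nat} (h : d < 10) : (Nat.digitChar d).isDigit = true := by
  interval_cases d <;> decide

theorem pv_digitChar_val {d : Nat} (h : d < 10) : (Nat.digitChar d).toNat - '0'.toNat = d := by
  interval_cases d <;> decide

theorem pv_toDigits_digits : ∀ (n : Nat), ∀ c ∈ Nat.toDigits 10 n, c.isDigit = true := by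
  intro n
  induction n using Nat.strong_induction_on with
  | _ n ih =>
    by_cases h : n < 10
    · rw [pv_toDigits_base h]
      intro c hc
      rw [List.mem_singleton] at hc
      subst hc
      exact pv_digitChar_isDigit h
    · rw [pv_toDigits_step (by omega)]
      intro c hc
      rw [List.mem_append] at hc
      rcases hc with hc | hc
      · exact ih (n / 10) (Nat.div_lt_self (by omega) (by omega)) c hc
      · rw [List.mem_singleton] at hc
        subst hc
        exact pv_digitChar_isDigit (Nat.mod_lt _ (by omega))

theorem pv_toDigits_ne_nil (n : Nat) : Nat.toDigits 10 n ≠ [] := by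
  by_cases h : n < 10
  · rw [pv_toDigits_base h]; simp
  · rw [pv_toDigits_step (by omega)]; simp

theorem pv_val_toDigits : ∀ (n : Nat),
    (Nat.toDigits 10 n).foldl (fun a c => a * 10 + (c.toNat - '0'.toNat)) 0 = n := by
  intro n
  induction n using Nat.strong_induction_on with
  | _ n ih =>
    by_cases h : n < 10
    · rw [pv_toDigits_base h]
      simp only [List.foldl_cons, List.foldl_nil]
      have := pv_digitChar_val h
      omega
    · rw [pv_toDigits_step (by omega), List.foldl_append]
      rw [ih (n / 10) (Nat.div_lt_self (by omega) (by omega))]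
      simp only [List.foldl_cons, List.foldl_nil]
      rw [pv_digitChar_val (Nat.mod_lt _ (by omega))]
      omega

-- ---- Python int(str(m)) = m for m ≥ 0 ----
theorem pv_roundtrip {m : Int} (hm : 0 ≤ m) : PySem.Int.ofStr? (PySem.Int.toStr m) = some m := by
  rw [PySem.Int.toStr.eq_1, PySem.Int.ofStr?_ofList]
  simp only [PySem.Int.toChars, if_neg (by omega : ¬ m < 0)]
  cases hL : Nat.toDigits 10 m.toNat with
  | nil => exact absurd hL (pv_toDigits_ne_nil _)
  | cons d tl =>
    rw [pv_parse_digits d tl (by rw [← hL]; exact pv_toDigits_digits m.toNat)]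
    rw [← hL, pv_val_toDigits]
    congr 1
    omega

-- ---- pvDigits facts ----
theorem pv_pvDigits_eq (n t : Int) : pvDigits n t = if 0 < n then pvDigits (n / 10) (t + n % 10) else t := by
  rw [pvDigits]
  by_cases h : 0 < n
  · rw [if_pos h, if_pos h, PySem.Int.floordiv_eq_ediv_of_pos (by norm_num),
        PySem.Int.mod_eq_emod_of_pos (by norm_num)]
  · rw [if_neg h, if_neg h]

theorem pv_pvDigits_lt10 {n : Int} (t : Int) (h0 : 0 ≤ n) (h : n < 10) : pvDigits n t = t + n := by
  rw [pv_pvDigits_eq]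
  by_cases hn : 0 < n
  · rw [if_pos hn, pv_pvDigits_eq, if_neg (by omega)]
    omega
  · rw [if_neg hn]; omega

theorem pv_pvDigits_lt100 {n : Int} (h0 : 0 ≤ n) (h : n < 100) : pvDigits n 0 = n / 10 + n % 10 := by
  by_cases hn : n < 10
  · rw [pv_pvDigits_lt10 0 h0 hn]; omega
  · rw [pv_pvDigits_eq, if_pos (by omega), pv_pvDigits_lt10 _ (by omega) (by omega)]
    omega

theorem pv_pvDigits_nonneg_fuel : ∀ (fuel : Nat) (n t : Int), n.toNat ≤ fuel → 0 ≤ t → 0 ≤ pvDigits n t := by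
  intro fuel
  induction fuel with
  | zero =>
    intro n t h ht
    rw [pv_pvDigits_eq, if_neg (by omega)]
    exact ht
  | succ f ih =>
    intro n t h ht
    rw [pv_pvDigits_eq]
    by_cases hp : 0 < n
    · rw [if_pos hp]
      exact ih _ _ (by omega) (by omega)
    · rw [if_neg hp]
      exact ht

theorem pv_pvDigits_nonneg (n t : Int) (ht : 0 ≤ t) : 0 ≤ pvDigits n t :=
  pv_pvDigits_nonneg_fuel n.toNat n t (le_refl _) ht

-- ---- digit sum of str(m), charwise with Python int(), equals pvDigits m 0 ----
theorem pv_val_digitChar {d : Nat} (h : d < 10) : pvVal (Nat.digitChar d) = (d : Int) := by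
  unfold pvVal
  interval_cases d <;> decide

theorem pv_sum_toDigits : ∀ (n : Nat) (t : Int),
    t + ((Nat.toDigits 10 n).map pvVal).sum = pvDigits (n : Int) t := by
  intro n
  induction n using Nat.strong_induction_on with
  | _ n ih =>
    intro t
    by_cases h : n < 10
    · rw [pv_toDigits_base h]
      simp only [List.map_cons, List.map_nil, List.sum_cons, List.sum_nil]
      rw [pv_val_digitChar h, pv_pvDigits_lt10 t (by omega) (by omega)]
      omega
    · rw [pv_toDigits_step (by omega), pv_pvDigits_eq, if_pos (by omega)]
      rw [List.map_append, List.sum_append]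
      simp only [List.map_cons, List.map_nil, List.sum_cons, List.sum_nil]
      rw [pv_val_digitChar (Nat.mod_lt _ (by omega))]
      have hcast1 : ((n : Int)) / 10 = ((n / 10 : Nat) : Int) := by omega
      have hcast2 : ((n : Int)) % 10 = ((n % 10 : Nat) : Int) := by omega
      rw [hcast1, hcast2, ← ih (n / 10) (Nat.div_lt_self (by omega) (by omega)) (t + ((n % 10 : Nat) : Int))]
      omega

theorem pv_charSum_toStr {m : Int} (hm : 0 ≤ m) :
    ((PySem.Int.toStr m).toList.map pvVal).sum = pvDigits m 0 := by
  rw [PySem.Int.toList_toStr]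
  simp only [PySem.Int.toChars, if_neg (by omega : ¬ m < 0)]
  have := pv_sum_toDigits m.toNat 0
  rw [Int.toNat_of_nonneg hm] at this
  omega

-- ---- loop shape: foldl over a range ignoring the index is function iteration ----
theorem pv_foldl_const_iterate {α β : Type} (f : α → α) : ∀ (L : List β) (a : α),
    L.foldl (fun x _ => f x) a = f^[L.length] a := by
  intro L
  induction L with
  | nil => intro a; rfl
  | cons b L ih =>
    intro a
    simp only [List.foldl_cons, List.length_cons]
    rw [ih (f a), Function.iterate_succ_apply]


-- ---- "".join of character lists is flatten ----
theorem pv_join_nil_flatten : ∀ (parts : List (List Char)), PySem.Chars.join [] parts = parts.flatten := by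
  intro parts
  induction parts with
  | nil => rw [PySem.Chars.join_nil]; rfl
  | cons x rest ih =>
    cases rest with
    | nil => rw [PySem.Chars.join_singleton]; simp
    | cons y t =>
      rw [PySem.Chars.join_cons_cons, ih]
      simp

-- ---- round 1: char-wise digit sum of the joined per-character strings = B's arithmetic sum ----
theorem pv_round1 : ∀ (cs : List Char), (∀ c ∈ cs, 0 ≤ (c.toNat : Int) - 96 ∧ (c.toNat : Int) - 96 ≤ 30) →
    ((PySem.Str.join "" (cs.map (fun c => PySem.Int.toStr ((c.toNat : Int) - 96)))).toList.map pvVal).sum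
      = (cs.map (fun c => PySem.Int.floordiv ((c.toNat : Int) - 96) 10 + PySem.Int.mod ((c.toNat : Int) - 96) 10)).sum := by
  intro cs h
  rw [PySem.Str.toList_join, show ("" : String).toList = [] from rfl, pv_join_nil_flatten,
      List.map_map, List.map_flatten, List.sum_flatten, List.map_map, List.map_map]
  apply congrArg List.sum
  apply List.map_congr_left
  intro c hc
  obtain ⟨h0, h30⟩ := h c hc
  show ((PySem.Int.toStr ((c.toNat : Int) - 96)).toList.map pvVal).sum = _
  rw [pv_charSum_toStr h0, pv_pvDigits_lt100 h0 (by omega),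
      PySem.Int.floordiv_eq_ediv_of_pos (by norm_num), PySem.Int.mod_eq_emod_of_pos (by norm_num)]

-- ---- the digit-sum rounds, as iterated functions on both sides ----
theorem pv_iter : ∀ (j : Nat) (m : Int), 0 ≤ m →
    (fun total => PySem.Int.toStr ((total.toList.map pvVal).sum))^[j] (PySem.Int.toStr m)
      = PySem.Int.toStr ((fun n => if n < 10 then n else pvDigits n 0)^[j] m)
    ∧ 0 ≤ (fun n => if n < 10 then n else pvDigits n 0)^[j] m := by
  intro j
  induction j with
  | zero => intro m hm; exact ⟨rfl, hm⟩
  | succ j ih =>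
    intro m hm
    rw [Function.iterate_succ_apply, Function.iterate_succ_apply]
    have hstep : PySem.Int.toStr (((PySem.Int.toStr m).toList.map pvVal).sum)
        = PySem.Int.toStr (if m < 10 then m else pvDigits m 0) := by
      rw [pv_charSum_toStr hm]
      by_cases h10 : m < 10
      · rw [if_pos h10, pv_pvDigits_lt10 0 hm h10, zero_add]
      · rw [if_neg h10]
    rw [hstep]
    exact ih _ (by
      show 0 ≤ if m < 10 then m else pvDigits m 0
      by_cases h10 : m < 10
      · rw [if_pos h10]; exact hm
      · rw [if_neg h10]; exact pv_pvDigits_nonneg _ _ (le_refl 0))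

-- ===== VERDICT (by name: the statement is the Claim_ definition above) =====
theorem getLucky_spec : Claim_equal_getLucky := by
  unfold Claim_equal_getLucky
  intro s k hdom hpre
  unfold Spec_getLucky
  simp only [getLucky, getLucky_alt]
  by_cases hk : k ≤ 0
  · rw [if_pos hk]
    rw [PySem.List.foldl_append_singleton_eq_map, List.nil_append,
        PySem.List.pyRange_one_eq_nil hk, List.foldl_nil]
  · rw [if_neg hk]
    have hk1 : 1 ≤ k := by omega
    unfold Pre_getLucky at hpre
    rw [if_pos hk1] at hpre
    rw [List.all_eq_true] at hpre
    have hdc : ∀ c ∈ s.toList, 0 ≤ (c.toNat : Int) - 96 ∧ (c.toNat : Int) - 96 ≤ 30 := by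
      intro c hc
      have h1 := hpre c hc
      rw [decide_eq_true_eq] at h1
      have h2 : pvDomChar c = true := by
        have h3 : pvDomStr s = true := by
          unfold Dom_getLucky at hdom
          rw [Bool.and_eq_true] at hdom
          exact hdom.1
        unfold pvDomStr at h3
        rw [List.all_eq_true] at h3
        exact h3 c hc
      unfold pvDomChar at h2
      simp only [Bool.or_eq_true, Bool.and_eq_true, decide_eq_true_eq, beq_iff_eq] at h2
      omega
    rw [PySem.List.foldl_append_singleton_eq_map, List.nil_append]
    rw [PySem.List.pyRange_one_cons (by omega : (0:Int) < k), List.foldl_cons]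
    simp only [PySem.List.foldl_add, zero_add]
    simp only [show (fun j => (PySem.Int.ofStr? (String.ofList [j])).getD 0) = pvVal from rfl]
    rw [pv_round1 s.toList hdc]
    have hS0 : 0 ≤ (s.toList.map (fun c => PySem.Int.floordiv ((c.toNat : Int) - 96) 10 + PySem.Int.mod ((c.toNat : Int) - 96) 10)).sum := by
      apply List.sum_nonneg
      intro x hx
      rw [List.mem_map] at hx
      obtain ⟨c, hc, rfl⟩ := hx
      obtain ⟨h0, h30⟩ := hdc c hc
      rw [PySem.Int.floordiv_eq_ediv_of_pos (by norm_num), PySem.Int.mod_eq_emod_of_pos (by norm_num)]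
      omega
    rw [pv_foldl_const_iterate (fun total => PySem.Int.toStr ((total.toList.map pvVal).sum)),
        pv_foldl_const_iterate (fun n => if n < 10 then n else pvDigits n 0)]
    rw [PySem.List.length_pyRange_one, PySem.List.length_pyRange_one, sub_zero]
    obtain ⟨he, hnn⟩ := pv_iter (k - 1).toNat _ hS0
    rw [he, pv_roundtrip hnn]
    rfl
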